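-- pv_equiv track=rewrite | github.com/bbehsaz/cyclonovo_dev | utils/kmerscore_test.py | findProperMAXKmer
-- ===== SOURCE A (Python) =====
-- def findProperMAXKmer(
--         candidate_kmers):  # It returns one of the highest scored kmers as representative. The one with most different amino acids is chosen randonmly
--     num_uniq_aas = {}
--     kmers_with_highest_numuniqaas = [0, []]
--     for kmer in candidate_kmers:
--         kmer_seq = kmer.split("-")
--         num_uniq_aas = len(set(kmer_seq))
--         if num_uniq_aas > kmers_with_highest_numuniqaas[0]:
--             kmers_with_highest_numuniqaas[0] = num_uniq_aas
--             kmers_with_highest_numuniqaas[1] = [kmer_seq]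
--         if num_uniq_aas == kmers_with_highest_numuniqaas[0]:
--             kmers_with_highest_numuniqaas[1].append(kmer_seq)
--     lowest_repeat_element = [20, ""]
--
--     for kmer_seq in kmers_with_highest_numuniqaas[1]:
--         repeat_element = max([kmer_seq.count(s) for s in set(kmer_seq)])
--         if repeat_element < lowest_repeat_element[0]:
--             lowest_repeat_element[0] = repeat_element
--             lowest_repeat_element[1] = kmer_seq
--     return "-".join(lowest_repeat_element[1])
-- ===== SOURCE B (Python) =====
-- def findProperMAXKmer(candidate_kmers):
--     best = None  # (uniq, rep, seq): running best, strictly-better key only, so first-in-order wins ties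
--     for kmer in candidate_kmers:
--         seq = kmer.split("-")
--         uniq = len(set(seq))
--         rep = max(seq.count(s) for s in set(seq))
--         if best is None or uniq > best[0] or (uniq == best[0] and rep < best[1]):
--             best = (uniq, rep, seq)
--     if best is None or best[1] >= 20:
--         return ""
--     return "-".join(best[2])
-- ===== Notes on version B (the rewrite author's own statement) =====
-- stated objective: simpler
-- what changed: A's two phases (collect every max-unique-count kmer sequence into a list, then rescan that list for the lowest max-repeat) are collapsed into one pass keeping a single running best keyed by (uniq, -rep), updated only on a strictly better key so the first kmer in input order still wins ties; A's sentinel behaviour (empty string on empty input or when the best max-repeat is >= 20) is kept via one final guard.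
import Mathlib
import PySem

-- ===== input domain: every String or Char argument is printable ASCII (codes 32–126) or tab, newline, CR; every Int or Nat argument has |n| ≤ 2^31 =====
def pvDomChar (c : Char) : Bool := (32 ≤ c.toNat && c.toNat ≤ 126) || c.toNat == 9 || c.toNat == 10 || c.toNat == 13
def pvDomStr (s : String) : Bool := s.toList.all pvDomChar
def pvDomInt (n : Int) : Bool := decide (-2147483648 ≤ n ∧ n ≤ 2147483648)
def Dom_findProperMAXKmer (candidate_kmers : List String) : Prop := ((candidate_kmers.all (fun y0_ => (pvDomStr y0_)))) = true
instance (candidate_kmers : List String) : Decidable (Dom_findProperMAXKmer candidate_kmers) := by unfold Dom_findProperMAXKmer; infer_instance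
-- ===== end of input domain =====

-- B replaces A's two-phase pipeline (collect all max-uniq kmer sequences, then scan that list
-- for the lowest max-repeat) by a single pass keeping one running best keyed by (uniq, -rep);
-- it keeps A's sentinel: empty input or a best max-repeat >= 20 yields "".

-- shared helpers: both Pythons contain the very same subexpressions
-- kmer.split("-"): exact for the literal non-empty separator "-"
-- (PySem.Str.split? returns some of exactly this list)
def pvSeq (k : String) : List String :=
  (PySem.Chars.splitOn k.toList ['-']).map String.ofList

-- len(set(kmer_seq))
def pvUniq (s : List String) : Int := PySem.Set.len (PySem.Set.ofList s)

-- max([kmer_seq.count(x) for x in set(kmer_seq)]); the max of the list does not depend on the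
-- set's iteration order; the `none` default 0 is unreachable (a split is never empty)
def pvRep (s : List String) : Int :=
  match PySem.List.max? ((PySem.Set.ofList s).map (fun x => (PySem.List.count s x : Int))) (fun x => x) with
  | some m => m
  | none => 0

-- ===== PORT A =====
-- loop 1: builds kmers_with_highest_numuniqaas = [best uniq-count, list of collected seqs]
def pvLoop1 (state : Int × List (List String)) (kmer : String) : Int × List (List String) :=
  let seq := pvSeq kmer
  let u := pvUniq seq
  let s1 := if state.1 < u then (u, [seq]) else state
  if u = s1.1 then (s1.1, s1.2 ++ [seq]) else s1

-- loop 2: lowest_repeat_element scan starting from [20, ""]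
def pvLoop2 (state : Int × List String) (seq : List String) : Int × List String :=
  if pvRep seq < state.1 then (pvRep seq, seq) else state

-- the initial lowest_repeat_element[1] = "" is ported as []: "-".join("") = "-".join([]) = ""
def findProperMAXKmer (candidate_kmers : List String) : String :=
  let best := candidate_kmers.foldl pvLoop1 (0, [])
  let low := best.2.foldl pvLoop2 (20, [])
  PySem.Str.join "-" low.2

-- ===== PORT B =====
def pvStep (o : Option (Int × Int × List String)) (kmer : String) : Option (Int × Int × List String) :=
  let seq := pvSeq kmer
  let u := pvUniq seq
  let r := pvRep seq
  match o with
  | none => some (u, r, seq)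
  | some (bu, br, bs) =>
      if bu < u ∨ (u = bu ∧ r < br) then some (u, r, seq) else some (bu, br, bs)

def findProperMAXKmer_alt (candidate_kmers : List String) : String :=
  match candidate_kmers.foldl pvStep none with
  | none => ""
  | some (_, br, bs) => if 20 ≤ br then "" else PySem.Str.join "-" bs

-- ===== PRECONDITION & SPEC =====
def Spec_findProperMAXKmer (candidate_kmers : List String) (out : String) : Prop := out = findProperMAXKmer_alt candidate_kmers
instance (candidate_kmers : List String) (out : String) : Decidable (Spec_findProperMAXKmer candidate_kmers out) := by unfold Spec_findProperMAXKmer; infer_instance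

-- ===== CLAIM (what is proved, stated in full; the proofs are below) =====
def Claim_equal_findProperMAXKmer : Prop := ∀ (candidate_kmers : List String), Dom_findProperMAXKmer candidate_kmers → Spec_findProperMAXKmer candidate_kmers (findProperMAXKmer candidate_kmers)

-- ===== LEMMAS AND PROOFS =====

-- splitOn.go always produces at least one piece
theorem pvSplitGo_ne_nil (f : Nat) (sep : List Char) :
    ∀ (s cur : List Char) (acc : List (List Char)), PySem.Chars.splitOn.go sep f s cur acc ≠ [] := by
  induction f with
  | zero =>
    intro s cur acc
    unfold PySem.Chars.splitOn.go
    simp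
  | succ f ih =>
    intro s cur acc
    unfold PySem.Chars.splitOn.go
    cases s with
    | nil => simp
    | cons c rest =>
      dsimp only
      split
      · exact ih _ _ _
      · exact ih _ _ _

theorem pvSeq_ne_nil (k : String) : pvSeq k ≠ [] := by
  unfold pvSeq PySem.Chars.splitOn
  intro h
  exact pvSplitGo_ne_nil _ _ _ _ _ (List.map_eq_nil_iff.mp h)

theorem pvUniq_pos (k : String) : 0 < pvUniq (pvSeq k) := by
  unfold pvUniq
  have h1 : pvSeq k ≠ [] := pvSeq_ne_nil k
  have h2 : PySem.Set.ofList (pvSeq k) ≠ [] := by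
    intro h
    cases hs : pvSeq k with
    | nil => exact h1 hs
    | cons a t =>
      have : a ∈ PySem.Set.ofList (pvSeq k) := by
        rw [PySem.Set.mem_ofList, hs]; exact List.mem_cons_self
      rw [h] at this; exact absurd this (List.not_mem_nil)
  have : 0 < (PySem.Set.ofList (pvSeq k)).length := List.length_pos_iff.mpr h2
  simp [PySem.Set.len]
  omega

-- the running minimum of loop 2 never exceeds its start value
theorem pvLoop2_fst_le (T : List (List String)) :
    ∀ (r : Int) (s : List String), (T.foldl pvLoop2 (r, s)).1 ≤ r := by
  induction T with
  | nil => intro r s; simp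
  | cons h T ih =>
    intro r s
    simp only [List.foldl_cons]
    unfold pvLoop2
    split
    · exact le_trans (ih _ _) (by omega)
    · exact ih _ _

-- A's scan from the sentinel (20, []) and B's scan from an already-seen pair (b, sb) with
-- 20 ≤ b produce the same joined answer once B applies its final ≥ 20 guard
theorem pvScan_agree (T : List (List String)) :
    ∀ (b : Int) (sb : List String), 20 ≤ b →
      (if 20 ≤ (T.foldl pvLoop2 (b, sb)).1 then "" else PySem.Str.join "-" (T.foldl pvLoop2 (b, sb)).2)
        = PySem.Str.join "-" (T.foldl pvLoop2 (20, ([] : List String))).2 := by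
  induction T with
  | nil =>
    intro b sb hb
    simp only [List.foldl_nil]
    rw [if_pos hb]
    decide
  | cons h T ih =>
    intro b sb hb
    simp only [List.foldl_cons]
    by_cases hr : pvRep h < 20
    · have hA : pvLoop2 (20, ([] : List String)) h = (pvRep h, h) := by
        unfold pvLoop2; rw [if_pos hr]
      have hB : pvLoop2 (b, sb) h = (pvRep h, h) := by
        unfold pvLoop2; rw [if_pos (by omega)]
      rw [hA, hB]
      rw [if_neg (by have := pvLoop2_fst_le T (pvRep h) h; omega)]
    · have hA : pvLoop2 (20, ([] : List String)) h = (20, ([] : List String)) := by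
        unfold pvLoop2; rw [if_neg (by omega)]
      rw [hA]
      unfold pvLoop2
      split
      · exact ih _ _ (by omega)
      · exact ih _ _ hb

-- the invariant tying A's state (best uniq, collected list) to B's running best:
-- A's list is f :: f :: T (the first maximizer is appended twice by A's two ifs) and B's
-- stored (rep, seq) is exactly loop 2's strict-min scan of f :: T started at its head f
def pvRel (st : Int × List (List String)) (o : Option (Int × Int × List String)) : Prop :=
  (st = (0, []) ∧ o = none) ∨
  (∃ f T, st.2 = f :: f :: T ∧ o = some (st.1, T.foldl pvLoop2 (pvRep f, f)))

theorem pvRel_step (st : Int × List (List String)) (o : Option (Int × Int × List String))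
    (k : String) (h : pvRel st o) : pvRel (pvLoop1 st k) (pvStep o k) := by
  rcases h with ⟨hst, ho⟩ | ⟨f, T, hL, ho⟩
  · subst hst; subst ho
    have hu : 0 < pvUniq (pvSeq k) := pvUniq_pos k
    right
    refine ⟨pvSeq k, [], ?_, ?_⟩ <;>
      simp [pvLoop1, pvStep, if_pos hu]
  · obtain ⟨bu, L⟩ := st
    simp only at hL; subst hL; subst ho
    rcases lt_trichotomy bu (pvUniq (pvSeq k)) with hgt | heq | hlt
    · -- strictly better uniq count: both reset
      right
      refine ⟨pvSeq k, [], ?_, ?_⟩ <;>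
        simp [pvLoop1, pvStep, hgt]
    · -- equal uniq count: A appends, B performs exactly one pvLoop2 step
      subst heq
      right
      refine ⟨f, T ++ [pvSeq k], ?_, ?_⟩
      · simp [pvLoop1]
      · by_cases hrb : pvRep (pvSeq k) < (T.foldl pvLoop2 (pvRep f, f)).1
        · simp [pvLoop1, pvStep, pvLoop2, List.foldl_append, hrb]
        · simp [pvLoop1, pvStep, pvLoop2, List.foldl_append, hrb]
    · -- worse uniq count: both keep their state
      right
      have hnc : ¬ (bu < pvUniq (pvSeq k) ∨
          (pvUniq (pvSeq k) = bu ∧ pvRep (pvSeq k) < (T.foldl pvLoop2 (pvRep f, f)).1)) := by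
        rintro (h | ⟨h, -⟩) <;> omega
      refine ⟨f, T, ?_, ?_⟩
      · simp [pvLoop1, if_neg (by omega : ¬ bu < pvUniq (pvSeq k)),
          if_neg (by omega : ¬ pvUniq (pvSeq k) = bu)]
      · simp [pvStep, if_neg hnc, pvLoop1, if_neg (by omega : ¬ bu < pvUniq (pvSeq k)),
          if_neg (by omega : ¬ pvUniq (pvSeq k) = bu)]

theorem pvRel_foldl (ks : List String) :
    ∀ st o, pvRel st o → pvRel (ks.foldl pvLoop1 st) (ks.foldl pvStep o) := by
  induction ks with
  | nil => intro st o h; exact h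
  | cons k ks ih =>
    intro st o h
    exact ih _ _ (pvRel_step st o k h)

-- ===== VERDICT (by name: the statement is the Claim_ definition above) =====
theorem findProperMAXKmer_spec : Claim_equal_findProperMAXKmer := by
  intro ks _
  unfold Spec_findProperMAXKmer findProperMAXKmer findProperMAXKmer_alt
  dsimp only
  have h := pvRel_foldl ks (0, []) none (Or.inl ⟨rfl, rfl⟩)
  rcases h with ⟨hst, ho⟩ | ⟨f, T, hL, ho⟩
  · rw [hst, ho]; decide
  · rw [ho, hL]
    simp only [List.foldl_cons]
    by_cases hr : pvRep f < 20
    · have h1 : pvLoop2 (20, ([] : List String)) f = (pvRep f, f) := by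
        unfold pvLoop2; rw [if_pos hr]
      have h2 : pvLoop2 (pvRep f, f) f = (pvRep f, f) := by
        unfold pvLoop2; rw [if_neg (by omega)]
      rw [h1, h2]
      rw [if_neg (by have := pvLoop2_fst_le T (pvRep f) f; omega)]
    · have h1 : pvLoop2 (20, ([] : List String)) f = (20, ([] : List String)) := by
        unfold pvLoop2; rw [if_neg (by omega)]
      rw [h1, h1]
      exact (pvScan_agree T (pvRep f) f (by omega)).symm
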